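-- pv_equiv track=rewrite | github.com/vinchinzu/euler | python/807.py | central_eulerian
-- ===== SOURCE A (Python) =====
-- import math
--
-- def central_eulerian(n: int) -> int:
--     """
--     Return a(n) = A(2n-1, n), also known as OEIS A025585(n).
--
--     Closed form (integer):
--         a(n) = sum_{j=0..n} (-1)^j * C(2n, j) * (n-j)^(2n-1)
--
--     Note: the j=n term is 0^(2n-1)=0, so the loop may stop at n-1.
--     """
--     if n <= 0:
--         raise ValueError("n must be positive")
--     m = 2 * n - 1
--     total = 0
--     for j in range(0, n):  # j=n contributes 0
--         base = n - j
--         term = math.comb(2 * n, j) * pow(base, m)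
--         if j & 1:
--             total -= term
--         else:
--             total += term
--     return total
-- ===== SOURCE B (Python) =====
-- def central_eulerian(n: int) -> int:
--     if n <= 0:
--         raise ValueError("n must be positive")
--     m = 2 * n - 1
--     # forward-difference table: a(n) is the 2n-th finite difference of
--     # x -> x^m (with n leading zeros) taken at the start of the table
--     vals = [0] * n + [i ** m for i in range(n + 1)]
--     for _ in range(2 * n):
--         vals = [vals[i + 1] - vals[i] for i in range(len(vals) - 1)]
--     return vals[0]
-- ===== Notes on version B (the rewrite author's own statement) =====
-- stated objective: alternative
-- what changed: Replaces the alternating binomial sum (math.comb and pow per term) by a forward-difference table: start from n zeros followed by 0^m..n^m and take 2n successive pairwise-difference passes, returning the single remaining entry.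
-- outside the precondition, e.g. on central_eulerian(0): A raises ValueError, B raises ValueError
import Mathlib
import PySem

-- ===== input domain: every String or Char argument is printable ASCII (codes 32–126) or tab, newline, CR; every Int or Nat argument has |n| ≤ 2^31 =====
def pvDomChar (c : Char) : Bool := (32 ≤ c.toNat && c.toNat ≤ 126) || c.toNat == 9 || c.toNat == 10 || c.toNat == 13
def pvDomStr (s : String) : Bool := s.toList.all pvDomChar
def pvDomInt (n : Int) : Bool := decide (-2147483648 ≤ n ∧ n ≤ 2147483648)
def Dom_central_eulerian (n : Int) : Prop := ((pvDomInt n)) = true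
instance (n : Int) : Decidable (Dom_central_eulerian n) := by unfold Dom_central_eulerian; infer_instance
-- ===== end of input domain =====

-- B replaces A's alternating binomial sum by an explicit forward-difference table
-- (a DP over rows): alternative decomposition, same exact values; not claimed faster.

-- ===== PORT A =====
-- Python A raises ValueError for n ≤ 0; those inputs are excluded by Pre_ below.
def central_eulerian (n : Int) : Int :=
  let m : Int := 2 * n - 1
  -- math.comb → Nat.choose, pow → ^ on Nat exponent: exact for the nonnegative
  -- arguments reached under Pre_ (j ∈ [0,n), 2n > 0, m ≥ 1).
  (PySem.List.pyRange 0 n 1).foldl (fun total j =>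
    let base := n - j
    let term : Int := ((2 * n).toNat.choose j.toNat : Int) * base ^ m.toNat
    if PySem.Int.band j 1 ≠ 0 then total - term else total + term) 0

-- ===== PORT B =====
-- one comprehension step: [vals[i+1] - vals[i] for i in range(len(vals)-1)]
def diffRow (vals : List Int) : List Int :=
  (PySem.List.pyRange 0 ((vals.length : Int) - 1) 1).map
    (fun i => PySem.List.pyGetD vals (i + 1) 0 - PySem.List.pyGetD vals i 0)

-- Python B raises ValueError for n ≤ 0; those inputs are excluded by Pre_ below.
def central_eulerian_alt (n : Int) : Int :=
  let m : Nat := (2 * n - 1).toNat   -- exponent m = 2n-1 ≥ 1 under Pre_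
  let vals : List Int :=
    List.replicate n.toNat 0 ++ (List.range (n.toNat + 1)).map (fun i : ℕ => (i : Int) ^ m)
  let final := (List.range (2 * n).toNat).foldl (fun v _ => diffRow v) vals
  PySem.List.pyGetD final 0 0   -- vals[0]; final is nonempty under Pre_

-- ===== PRECONDITION & SPEC =====
-- Pre_ excludes exactly the inputs n ≤ 0, on which the Python A raises ValueError.
def Pre_central_eulerian (n : Int) : Prop := 1 ≤ n
instance (n : Int) : Decidable (Pre_central_eulerian n) := by unfold Pre_central_eulerian; infer_instance
def pvWitness_central_eulerian : Int := 3

def Spec_central_eulerian (n : Int) (out : Int) : Prop := out = central_eulerian_alt n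
instance (n : Int) (out : Int) : Decidable (Spec_central_eulerian n out) := by unfold Spec_central_eulerian; infer_instance

-- ===== CLAIM (what is proved, stated in full; the proofs are below) =====
def Claim_equal_central_eulerian : Prop := ∀ (n : Int), Dom_central_eulerian n → Pre_central_eulerian n → Spec_central_eulerian n (central_eulerian n)

-- ===== LEMMAS AND PROOFS =====

theorem foldl_range_const {α : Type} (g : α → α) (k : ℕ) (x : α) :
    (List.range k).foldl (fun v _ => g v) x = g^[k] x := by
  induction k with
  | zero => simp
  | succ k ih => rw [List.range_succ, List.foldl_append, ih, Function.iterate_succ_apply']; rfl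

theorem length_diffRow (vals : List Int) : (diffRow vals).length = vals.length - 1 := by
  simp [diffRow, PySem.List.length_pyRange_one]

theorem getD_diffRow (vals : List Int) (i : ℕ) (h : i + 1 < vals.length) :
    (diffRow vals).getD i 0 = vals.getD (i + 1) 0 - vals.getD i 0 := by
  have hlen : i < (diffRow vals).length := by rw [length_diffRow]; omega
  rw [List.getD_eq_getElem _ _ hlen]
  simp only [diffRow] at hlen ⊢
  rw [List.getElem_map, PySem.List.getElem_pyRange_one]
  have h1 : (0:Int) + (i:Int) + 1 = ((i+1 : ℕ) : Int) := by push_cast; ring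
  have h2 : (0:Int) + (i:Int) = ((i : ℕ) : Int) := by simp
  rw [h1, h2, PySem.List.pyGetD_natCast, PySem.List.pyGetD_natCast]

theorem getD_iterate_diffRow (k : ℕ) (vals : List Int) (i : ℕ) (h : i + k < vals.length) :
    (diffRow^[k] vals).getD i 0 = (fwdDiff (1 : ℕ))^[k] (fun t : ℕ => vals.getD t 0) i := by
  induction k generalizing vals i with
  | zero => simp
  | succ k ih =>
    rw [Function.iterate_succ_apply]
    have hlen : i + k < (diffRow vals).length := by rw [length_diffRow]; omega
    rw [ih (diffRow vals) i (by omega), Function.iterate_succ_apply]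
    rw [fwdDiff_iter_eq_sum_shift, fwdDiff_iter_eq_sum_shift]
    apply Finset.sum_congr rfl
    intro j hj
    have hj' : j < k + 1 := Finset.mem_range.mp hj
    congr 1
    simp only [smul_eq_mul, mul_one]
    rw [getD_diffRow vals _ (by omega)]
    simp [fwdDiff]
theorem foldl_signed_sum {α : Type} (l : List α) (P : α → Prop) [DecidablePred P]
    (f : α → Int) (s : Int) :
    l.foldl (fun t j => if P j then t - f j else t + f j) s
      = s + (l.map (fun j => if P j then -f j else f j)).sum := by
  induction l generalizing s with
  | nil => simp
  | cons a l ih => by_cases h : P a <;> simp [h, ih] <;> ring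

theorem sum_map_range (n : ℕ) (f : ℕ → Int) :
    ((List.range n).map f).sum = ∑ k ∈ Finset.range n, f k := rfl
theorem central_eulerian_eq_sum (n : Int) (hn : 1 ≤ n) :
    central_eulerian n
      = ∑ k ∈ Finset.range n.toNat,
          (-1 : Int) ^ k * ((2 * n.toNat).choose k : Int)
            * ((n.toNat : Int) - k) ^ (2 * n.toNat - 1) := by
  simp only [central_eulerian]
  rw [PySem.List.pyRange_one, List.foldl_map, foldl_signed_sum, sum_map_range, zero_add]
  apply Finset.sum_congr
  · congr 1; omega
  intro k hk
  have hk' : k < n.toNat := by rw [Finset.mem_range] at hk; omega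
  have hband : PySem.Int.band (0 + (k : Int)) 1 = ((k % 2 : ℕ) : Int) := by
    rw [zero_add, PySem.Int.band_one]
    exact_mod_cast PySem.Int.mod_natCast k 2
  have htoNat : (0 + (k : Int)).toNat = k := by omega
  have hchoose : (2 * n).toNat = 2 * n.toNat := by omega
  have hexp : (2 * n - 1).toNat = 2 * n.toNat - 1 := by omega
  have hbase : n - (0 + (k : Int)) = (n.toNat : Int) - k := by omega
  rw [hband, htoNat, hchoose, hexp, hbase]
  by_cases hpar : k % 2 = 1
  · have hodd : Odd k := Nat.odd_iff.mpr hpar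
    rw [if_pos (by exact_mod_cast by omega), hodd.neg_one_pow]
    ring
  · have heven : Even k := Nat.even_iff.mpr (by omega)
    rw [if_neg (by simp; omega), heven.neg_one_pow]
    ring
theorem central_eulerian_alt_eq_sum (n : Int) (hn : 1 ≤ n) :
    central_eulerian_alt n
      = ∑ k ∈ Finset.range n.toNat,
          (-1 : Int) ^ k * ((2 * n.toNat).choose k : Int)
            * ((n.toNat : Int) - k) ^ (2 * n.toNat - 1) := by
  simp only [central_eulerian_alt]
  set N := n.toNat with hN
  have hN1 : 1 ≤ N := by omega
  set m : ℕ := (2 * n - 1).toNat with hm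
  have hmval : m = 2 * N - 1 := by omega
  have hm1 : 1 ≤ m := by omega
  set vals : List Int :=
    List.replicate N 0 ++ (List.range (N + 1)).map (fun i : ℕ => (i : Int) ^ m) with hvals
  have hlen : vals.length = 2 * N + 1 := by simp [hvals]; omega
  have h2n : (2 * n).toNat = 2 * N := by omega
  -- entries of the initial row
  have hg : ∀ t : ℕ, vals.getD t 0 = if t < N then 0 else if t ≤ 2 * N then ((t - N : ℕ) : Int) ^ m else 0 := by
    intro t
    rw [List.getD_eq_getElem?_getD, hvals]
    by_cases ht : t < N
    · rw [if_pos ht, List.getElem?_append_left (by simp; omega)]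
      simp [ht]
    · rw [if_neg ht, List.getElem?_append_right (by simp; omega)]
      by_cases ht2 : t ≤ 2 * N
      · rw [if_pos ht2]
        simp only [List.length_replicate, List.getElem?_map]
        rw [List.getElem?_eq_getElem (by simp; omega)]
        simp [List.getElem_range]
      · rw [if_neg ht2]
        simp only [List.length_replicate, List.getElem?_map]
        rw [List.getElem?_eq_none (by simp; omega)]
        simp
  rw [foldl_range_const, h2n]
  rw [PySem.List.pyGetD_ofNat', getD_iterate_diffRow _ _ _ (by simp [hvals]; omega)]
  rw [fwdDiff_iter_eq_sum_shift]
  -- reflect the summation index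
  rw [← Finset.sum_range_reflect]
  rw [← Finset.sum_subset (show Finset.range N ⊆ Finset.range (2 * N + 1) from
        fun x hx => Finset.mem_range.mpr (by have := Finset.mem_range.mp hx; omega))]
  · apply Finset.sum_congr rfl
    intro j hj
    have hj' : j < N := Finset.mem_range.mp hj
    have e1 : 2 * N + 1 - 1 - j = 2 * N - j := by omega
    rw [e1]
    have e2 : 2 * N - (2 * N - j) = j := by omega
    rw [e2]
    simp only [smul_eq_mul, mul_one, zero_add]
    rw [hg, if_neg (by omega), if_pos (by omega)]
    have e3 : 2 * N - j - N = N - j := by omega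
    have e4 : (2 * N).choose (2 * N - j) = (2 * N).choose j := Nat.choose_symm (by omega)
    rw [e3, e4, hmval]
    have e5 : ((N - j : ℕ) : Int) = (N : Int) - j := by omega
    rw [e5]
  · intro j hjbig hjsmall
    have hj1 : j < 2 * N + 1 := Finset.mem_range.mp hjbig
    have hj2 : N ≤ j := by simpa [Finset.mem_range, not_lt] using hjsmall
    have e1 : 2 * N + 1 - 1 - j = 2 * N - j := by omega
    rw [e1]
    simp only [smul_eq_mul, mul_one, zero_add]
    rw [hg]
    by_cases hjN : j = N
    · rw [if_neg (by omega), if_pos (by omega)]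
      have : 2 * N - j - N = 0 := by omega
      rw [this]
      simp [zero_pow (show m ≠ 0 by omega)]
    · rw [if_pos (by omega)]
      ring

-- ===== VERDICT (by name: the statement is the Claim_ definition above) =====
theorem central_eulerian_spec : Claim_equal_central_eulerian := by
  intro n _ hn
  unfold Spec_central_eulerian
  rw [central_eulerian_eq_sum n hn, central_eulerian_alt_eq_sum n hn]
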